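-- pv_equiv track=rewrite | github.com/Dawnnote/Coding_Test | 프로그래머스/lv1/92334. 신고 결과 받기/신고 결과 받기.py | solution
-- ===== SOURCE A (Python) =====
-- def solution(id_list, report, k):
--
--     user_dic = {i : 0 for i in id_list}
--
--     report_dic = {}
--     for i in set(report):
--         user, reports = i.split(' ')
--         if reports in report_dic:
--             report_dic[reports] += [user]
--         else:
--             report_dic[reports] = [user]
--
--     reports = []
--     for v in report_dic.values():
--         if len(v) >= k:
--             reports += v
--
--     # reports = sum([v for v in report_dic.values() if len(v) >= k], [])
--
--     for name in reports:
--         if name in user_dic: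
--             user_dic[name] += 1
--
--     return list(user_dic.values())
-- ===== SOURCE B (Python) =====
-- def solution(id_list, report, k):
--     # Dedupe reports in first-occurrence order into (reporter, reported) pairs,
--     # count distinct reporters per reported user once, then answer per reporter.
--     seen = set()
--     pairs = []
--     for r in report:
--         if r not in seen:
--             seen.add(r)
--             u, t = r.split(' ')
--             pairs.append((u, t))
--     cnt = {}
--     for _, t in pairs:
--         cnt[t] = cnt.get(t, 0) + 1
--     return [sum(1 for (u, t) in pairs if u == i and cnt[t] >= k) for i in id_list]
-- ===== Notes on version B (the rewrite author's own statement) =====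
-- stated objective: simpler
-- what changed: Instead of grouping reporters per reported user into a dict of lists, flattening banned groups and re-walking that list incrementing a dict, B builds the distinct (reporter, reported) pairs once, counts distinct reporters per reported user, and answers each id directly by counting its pairs whose target reached k.
-- outside the precondition, e.g. on solution(['a', 'a'], ['a a'], 1): A returns [1], B returns [1, 1]
import Mathlib
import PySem

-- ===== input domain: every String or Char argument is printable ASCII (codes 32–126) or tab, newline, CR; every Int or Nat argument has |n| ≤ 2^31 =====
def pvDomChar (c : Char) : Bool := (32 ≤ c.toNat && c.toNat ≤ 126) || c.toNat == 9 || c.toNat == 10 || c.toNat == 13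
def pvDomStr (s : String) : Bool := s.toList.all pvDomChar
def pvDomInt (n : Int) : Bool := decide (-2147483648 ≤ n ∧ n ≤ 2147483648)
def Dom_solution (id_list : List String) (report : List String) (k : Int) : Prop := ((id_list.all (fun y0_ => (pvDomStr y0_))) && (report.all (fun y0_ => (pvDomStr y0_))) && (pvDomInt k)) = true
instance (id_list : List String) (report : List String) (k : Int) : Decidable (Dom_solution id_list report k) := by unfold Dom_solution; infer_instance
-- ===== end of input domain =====

-- B reorganises the computation around each reporter (count its deduped reports whose
-- target got >= k distinct reporters) instead of A's dict-of-lists grouping, flattening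
-- of banned groups and a second increment pass; objective: simpler.

-- ===== PORT A =====
-- helper: 'user, reported = i.split(' ')' — under Pre_ the split has exactly 2 parts,
-- so .getD is exact there.
def pvSplit2 (r : String) : String × String :=
  let parts := (PySem.Str.split? r " ").getD []   -- sep " " ≠ "", so split? is some
  (parts.getD 0 "", parts.getD 1 "")

def solution (id_list : List String) (report : List String) (k : Int) : List Int :=
  let user_dic : PySem.Dict String Int :=
    id_list.foldl (fun d i => d.insert i 0) PySem.Dict.empty
  -- 'if reported in report_dic: += [user] else: = [user]' is exactly Dict.modify with default []
  let report_dic : PySem.Dict String (List String) :=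
    (PySem.Set.ofList report).foldl
      (fun d i => let p := pvSplit2 i; d.modify p.2 [] (fun l => l ++ [p.1]))
      PySem.Dict.empty
  let reports : List String :=
    report_dic.values.foldl (fun acc v => if k ≤ (v.length : Int) then acc ++ v else acc) []
  let user_dic :=
    reports.foldl (fun d name => if d.contains name then d.modify name 0 (· + 1) else d) user_dic
  user_dic.values

-- ===== PORT B =====
def solution_alt (id_list : List String) (report : List String) (k : Int) : List Int :=
  let sp : PySem.Set String × List (String × String) :=
    report.foldl
      (fun st r => if st.1.contains r then st else (PySem.Set.add st.1 r, st.2 ++ [pvSplit2 r]))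
      (PySem.Set.empty, [])
  let pairs := sp.2
  let cnt : PySem.Dict String Int :=
    pairs.foldl (fun d p => d.insert p.2 (d.getD p.2 0 + 1)) PySem.Dict.empty
  id_list.map (fun i => ((pairs.countP (fun p => p.1 == i && decide (k ≤ cnt.getD p.2 0))) : Int))

-- ===== PRECONDITION & SPEC =====
-- Pre_ excludes (a) reports that do not split into exactly two space-separated fields,
-- on which A raises ValueError, and (b) id_lists with duplicate ids, on which A's
-- dict-comprehension silently dedupes the output rows (a dict-key artefact).
def Pre_solution (id_list : List String) (report : List String) (k : Int) : Prop :=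
  id_list.Nodup ∧ ∀ r ∈ report, ((PySem.Str.split? r " ").getD []).length = 2
instance (id_list : List String) (report : List String) (k : Int) : Decidable (Pre_solution id_list report k) := by unfold Pre_solution; infer_instance

def pvWitness_solution : List String × List String × Int := (["muzi", "frodo"], ["muzi frodo", "apeach frodo"], 2)

def Spec_solution (id_list : List String) (report : List String) (k : Int) (out : List Int) : Prop := out = solution_alt id_list report k
instance (id_list : List String) (report : List String) (k : Int) (out : List Int) : Decidable (Spec_solution id_list report k out) := by unfold Spec_solution; infer_instance

-- ===== CLAIM (what is proved, stated in full; the proofs are below) =====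
def Claim_equal_solution : Prop := ∀ (id_list : List String) (report : List String) (k : Int), Dom_solution id_list report k → Pre_solution id_list report k → Spec_solution id_list report k (solution id_list report k)

-- ===== LEMMAS AND PROOFS =====

-- B's dedup loop produces exactly (set(report), its image under pvSplit2).
theorem pv_b_pairs (l : List String) (s : PySem.Set String) :
    l.foldl (fun st r => if st.1.contains r then st else (PySem.Set.add st.1 r, st.2 ++ [pvSplit2 r]))
      (s, s.map pvSplit2)
    = (PySem.Set.update s l, (PySem.Set.update s l).map pvSplit2) := by
  induction l generalizing s with
  | nil => simp [PySem.Set.update]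
  | cons r l ih =>
    rw [List.foldl_cons, PySem.Set.update_cons]
    by_cases h : r ∈ s
    · simpa [h, PySem.Set.add_of_mem h] using ih s
    · have hadd : PySem.Set.add s r = s ++ [r] := PySem.Set.add_of_not_mem h
      have := ih (PySem.Set.add s r)
      rw [hadd] at this ⊢
      simpa [h] using this

-- the initial user_dic maps everything to 0 (present or not)
theorem pv_userdic0 (l : List String) (d : PySem.Dict String Int) (i : String)
    (h : d.getD i 0 = 0) :
    (l.foldl (fun d i => d.insert i 0) d).getD i 0 = 0 := by
  induction l generalizing d with
  | nil => simpa using h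
  | cons x l ih =>
    rw [List.foldl_cons]
    exact ih _ (by rw [PySem.Dict.getD_insert]; split <;> simp [h])

-- the guarded increment loop leaves the key list unchanged
theorem pv_incloop_keys (l : List String) (d : PySem.Dict String Int) :
    (l.foldl (fun d name => if d.contains name then d.modify name 0 (· + 1) else d) d).keys = d.keys := by
  induction l generalizing d with
  | nil => rfl
  | cons n l ih =>
    rw [List.foldl_cons]
    by_cases h : d.contains n = true
    · rw [if_pos h, ih, PySem.Dict.keys_modify,
        PySem.Dict.keys_insert_of_contains _ _ h]
    · rw [if_neg h, ih]

-- the guarded increment loop adds, to each key already present, its multiplicity in l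
theorem pv_incloop_getD (l : List String) (d : PySem.Dict String Int) (i : String) :
    (l.foldl (fun d name => if d.contains name then d.modify name 0 (· + 1) else d) d).getD i 0
    = d.getD i 0 + (if d.contains i then (l.count i : Int) else 0) := by
  induction l generalizing d with
  | nil => simp
  | cons n l ih =>
    rw [List.foldl_cons, List.count_cons]
    by_cases h : d.contains n = true
    · have hk : (d.modify n 0 (· + 1)).contains i = d.contains i := by
        rw [PySem.Dict.contains_modify]
        by_cases hin : i = n
        · simp [hin, h]
        · simp [hin]
      rw [if_pos h, ih, hk, PySem.Dict.getD_modify]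
      by_cases hin : i = n
      · subst hin
        rw [if_pos rfl, if_pos h, if_pos h]
        simp
        ring
      · have hni : (n == i) = false := by simpa using fun e : n = i => hin e.symm
        rw [if_neg hin, hni]
        simp
    · rw [if_neg h, ih]
      by_cases hin : i = n
      · subst hin; simp [h]
      · have hni : (n == i) = false := by simpa using fun e : n = i => hin e.symm
        simp [hni]

-- a 0/1 sum over a list is a countP (Nat version)
theorem pv_sum_ite (T : List String) (q : String → Bool) :
    (T.map (fun t => if q t then 1 else 0)).sum = T.countP q := by
  induction T with
  | nil => rfl
  | cons a T ih => rw [List.map_cons, List.sum_cons, List.countP_cons, ih]; omega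

-- in a duplicate-free list, the predicate 'b t && (t0 == t)' fires exactly once, at t0
theorem pv_count_single (T : List String) (t0 : String) (b : String → Bool)
    (hT : T.Nodup) (h : t0 ∈ T) :
    T.countP (fun t => b t && (t0 == t)) = if b t0 then 1 else 0 := by
  induction T with
  | nil => cases h
  | cons a T ih =>
    rw [List.countP_cons]
    rcases List.mem_cons.mp h with rfl | hmem
    · have hz : T.countP (fun t => b t && (t0 == t)) = 0 := by
        refine List.countP_eq_zero.mpr (fun t ht hq => ?_)
        have : t0 = t := by simpa using (Bool.and_elim_right hq)
        exact (List.nodup_cons.mp hT).1 (this ▸ ht)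
      rw [hz]; simp
    · have hne : (t0 == a) = false := by
        have : t0 ≠ a := fun e => (List.nodup_cons.mp hT).1 (e ▸ hmem)
        simpa using this
      rw [ih (List.nodup_cons.mp hT).2 hmem, hne]; simp

-- the central exchange: summing per-target counts over the distinct targets T
-- equals one countP over the pair list
theorem pv_sum_count (i : String) (cond : String → Bool)
    (P : List (String × String)) (T : List String)
    (hT : T.Nodup) (hcov : ∀ p ∈ P, p.2 ∈ T) :
    (T.map (fun t => if cond t then P.countP (fun p => p.1 == i && p.2 == t) else 0)).sum
    = P.countP (fun p => p.1 == i && cond p.2) := by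
  induction P with
  | nil => simp
  | cons p P ih =>
    have hsplit : ∀ t : String,
        (if cond t then List.countP (fun q => q.1 == i && q.2 == t) (p :: P) else 0)
        = (if cond t then P.countP (fun q => q.1 == i && q.2 == t) else 0)
          + (if ((cond t && (p.1 == i)) && (p.2 == t)) then 1 else 0) := by
      intro t
      rw [List.countP_cons]
      by_cases hc : cond t = true
      · by_cases hp : (p.1 == i && p.2 == t) = true <;> simp [hc, hp]
      · simp [hc]
    calc (T.map _).sum
        = (T.map (fun t => (if cond t then P.countP (fun q => q.1 == i && q.2 == t) else 0)
            + (if ((cond t && (p.1 == i)) && (p.2 == t)) then 1 else 0))).sum := by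
          exact congrArg List.sum (List.map_congr_left (fun t _ => hsplit t))
      _ = (T.map (fun t => if cond t then P.countP (fun q => q.1 == i && q.2 == t) else 0)).sum
            + (T.map (fun t => if ((cond t && (p.1 == i)) && (p.2 == t)) then 1 else 0)).sum :=
          List.sum_map_add
      _ = P.countP (fun q => q.1 == i && cond q.2)
            + (if (cond p.2 && (p.1 == i)) then 1 else 0) := by
          rw [ih (fun q hq => hcov q (List.mem_cons_of_mem _ hq)), pv_sum_ite,
            pv_count_single T p.2 (fun t => cond t && (p.1 == i)) hT (hcov p List.mem_cons_self)]
      _ = List.countP (fun q => q.1 == i && cond q.2) (p :: P) := by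
          rw [List.countP_cons]
          by_cases h1 : (p.1 == i) = true <;> by_cases h2 : cond p.2 = true <;>
            simp [h1, h2]


-- B's pipeline, characterised: one countP per id over the deduped pair list
theorem pv_b_count (id_list report : List String) (k : Int) :
    solution_alt id_list report k
    = id_list.map (fun i =>
        ((((PySem.Set.ofList report).map pvSplit2).countP
          (fun p => p.1 == i &&
            decide (k ≤ (((((PySem.Set.ofList report).map pvSplit2).map Prod.snd).count p.2 : Nat) : Int)))) : Int)) := by
  unfold solution_alt
  have hsp : List.foldl (fun st r => if st.1.contains r then st
        else (st.1.add r, st.2 ++ [pvSplit2 r]))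
        (PySem.Set.empty, ([] : List (String × String))) report
      = (PySem.Set.ofList report, (PySem.Set.ofList report).map pvSplit2) := by
    have h := pv_b_pairs report []
    rw [PySem.Set.update_nil_left] at h
    exact h
  rw [hsp]
  have hcnt : ∀ t : String,
      ((((PySem.Set.ofList report).map pvSplit2)).foldl
        (fun d p => d.insert p.2 (d.getD p.2 0 + 1)) PySem.Dict.empty).getD t 0
      = (((((PySem.Set.ofList report).map pvSplit2).map Prod.snd).count t : Nat) : Int) := by
    intro t
    rw [← List.foldl_map (f := Prod.snd)
        (g := fun (d : PySem.Dict String Int) x => d.insert x (d.getD x 0 + 1))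
        (l := ((PySem.Set.ofList report).map pvSplit2)) (init := PySem.Dict.empty),
      PySem.Dict.getD_foldl_insert_add_one]
    simp
  simp only [hcnt]


-- A's pipeline, characterised: the same countP per id (with the ban condition
-- phrased via the length of the per-target filter)
theorem pv_a_count (id_list report : List String) (k : Int) (hnd : id_list.Nodup) :
    solution id_list report k
    = id_list.map (fun i =>
        ((((PySem.Set.ofList report).map pvSplit2).countP
          (fun p => p.1 == i &&
            decide (k ≤ (((((PySem.Set.ofList report).map pvSplit2).filter
              (fun q => q.2 == p.2)).length : Nat) : Int)))) : Int)) := by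
  unfold solution
  -- name the deduped pair list
  have hdic : (PySem.Set.ofList report).foldl
        (fun d i => d.modify (pvSplit2 i).2 [] (fun l => l ++ [(pvSplit2 i).1])) PySem.Dict.empty
      = (((PySem.Set.ofList report).map pvSplit2).map Prod.swap).foldl
        (fun d p => d.modify p.1 [] (fun l => l ++ [p.2])) PySem.Dict.empty := by
    rw [List.foldl_map, List.foldl_map]
    simp
  rw [hdic]
  simp only []
  -- keys of the grouping dict: the distinct reported users, in order
  have hkeys : ((((PySem.Set.ofList report).map pvSplit2).map Prod.swap).foldl
        (fun d p => d.modify p.1 [] (fun l => l ++ [p.2])) PySem.Dict.empty).keys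
      = PySem.Set.ofList (((PySem.Set.ofList report).map pvSplit2).map Prod.snd) := by
    have h := PySem.Dict.keys_foldl_modify_key
      (l := ((PySem.Set.ofList report).map pvSplit2).map Prod.swap) (key := Prod.fst)
      (d0 := ([] : List String)) (f := fun _ p => (fun l => l ++ [p.2]))
      (d := PySem.Dict.empty)
    simpa [PySem.Set.update_nil_left, List.map_map, Function.comp] using h
  have hnodup : ((((PySem.Set.ofList report).map pvSplit2).map Prod.swap).foldl
        (fun d p => d.modify p.1 [] (fun l => l ++ [p.2])) PySem.Dict.empty).keys.Nodup := by
    rw [hkeys]; exact PySem.Set.nodup_ofList _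
  -- per-target group: reporters of t, in order
  have hgroup : ∀ t : String, ((((PySem.Set.ofList report).map pvSplit2).map Prod.swap).foldl
        (fun d p => d.modify p.1 [] (fun l => l ++ [p.2])) PySem.Dict.empty).getD t []
      = (((PySem.Set.ofList report).map pvSplit2).filter (fun q => q.2 == t)).map Prod.fst := by
    intro t
    have h := PySem.Dict.getD_foldl_modify_append
      (((PySem.Set.ofList report).map pvSplit2).map Prod.swap) PySem.Dict.empty t
    simpa [List.filter_map, List.map_map, Function.comp] using h
  -- the values list
  have hvals : ((((PySem.Set.ofList report).map pvSplit2).map Prod.swap).foldl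
        (fun d p => d.modify p.1 [] (fun l => l ++ [p.2])) PySem.Dict.empty).values
      = (PySem.Set.ofList (((PySem.Set.ofList report).map pvSplit2).map Prod.snd)).map
          (fun t => (((PySem.Set.ofList report).map pvSplit2).filter (fun q => q.2 == t)).map Prod.fst) := by
    rw [PySem.Dict.values_eq_map_keys _ hnodup ([] : List String), hkeys]
    exact List.map_congr_left (fun t _ => hgroup t)
  rw [hvals]
  -- the flattened banned-reporter list
  have hfun : (fun (acc : List String) v => if k ≤ (v.length : Int) then acc ++ v else acc)
      = (fun acc v => acc ++ (if k ≤ (v.length : Int) then v else [])) := by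
    funext acc v; split <;> simp
  rw [hfun, PySem.List.foldl_append_eq_flatMap, List.flatMap_map, List.nil_append]
  -- the initial user_dic: every id maps to 0, keys = id_list
  have hud0 : ∀ j : String,
      (id_list.foldl (fun d i => d.insert i (0 : Int)) PySem.Dict.empty).getD j 0 = 0 :=
    fun j => pv_userdic0 id_list PySem.Dict.empty j (by simp)
  have hudkeys : (id_list.foldl (fun d i => d.insert i (0 : Int)) PySem.Dict.empty).keys = id_list := by
    have h := PySem.Dict.keys_foldl_insert (l := id_list)
      (f := fun _ _ => (0 : Int)) (d := PySem.Dict.empty)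
    simpa [PySem.Set.update_nil_left, PySem.Set.ofList_eq_self_of_nodup id_list hnd] using h
  -- final dict: values in id_list order, value = multiplicity in the flattened list
  rw [PySem.Dict.values_eq_map_keys _ (by rw [pv_incloop_keys, hudkeys]; exact hnd) (0 : Int),
    pv_incloop_keys, hudkeys]
  refine List.map_congr_left (fun i hi => ?_)
  rw [pv_incloop_getD, hud0 i]
  have hci : (id_list.foldl (fun d i => d.insert i (0 : Int)) PySem.Dict.empty).contains i = true := by
    rw [PySem.Dict.contains_iff_mem_keys, hudkeys]; exact hi
  rw [hci, if_pos rfl, zero_add]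
  -- count of i in the flattened list = the claimed countP
  rw [List.count_flatMap]
  have hblock : ∀ t : String,
      (List.count i ∘ fun t => if k ≤ ((((((PySem.Set.ofList report).map pvSplit2).filter
            (fun q => q.2 == t)).map Prod.fst).length : Nat) : Int)
          then (((PySem.Set.ofList report).map pvSplit2).filter (fun q => q.2 == t)).map Prod.fst
          else []) t
      = (if (fun t => decide (k ≤ (((((PySem.Set.ofList report).map pvSplit2).filter
            (fun q => q.2 == t)).length : Nat) : Int))) t
          then ((PySem.Set.ofList report).map pvSplit2).countP (fun p => p.1 == i && p.2 == t)
          else 0) := by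
    intro t
    simp only [Function.comp_apply, List.length_map, decide_eq_true_eq]
    split
    · rw [List.count_eq_countP, List.countP_map, List.countP_filter]
      exact List.countP_congr (fun p _ => by simp [Function.comp, BEq.comm])
    · simp
  rw [List.map_congr_left (fun t _ => hblock t),
    pv_sum_count i _ _ _ (PySem.Set.nodup_ofList _)
      (fun p hp => (PySem.Set.mem_ofList _ _).mpr (List.mem_map_of_mem hp))]
-- ===== VERDICT (by name: the statement is the Claim_ definition above) =====
theorem solution_spec : Claim_equal_solution := by
  intro id_list report k _hdom hpre
  unfold Spec_solution
  rw [pv_a_count id_list report k hpre.1, pv_b_count]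
  refine List.map_congr_left (fun i _ => ?_)
  congr 1
  refine List.countP_congr (fun p _ => ?_)
  have h : ((((PySem.Set.ofList report).map pvSplit2).map Prod.snd).count p.2)
      = (((PySem.Set.ofList report).map pvSplit2).filter (fun q => q.2 == p.2)).length := by
    rw [List.count_eq_countP, List.countP_map, List.countP_eq_length_filter]
    rfl
  rw [h]
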